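-- pv_equiv track=rewrite | github.com/kstych/resume-parser | root/data/resumeparser/dashboard/grex/gen.py | ngram_sets
-- ===== SOURCE A (Python) =====
-- def ngram_sets(PATTERNS):
--     PATTERNS_NGRAMS = {}
--
--     for pat in PATTERNS:
--         key = pat.count(' ')+1
--         if key in PATTERNS_NGRAMS:
--             PATTERNS_NGRAMS[key].append(pat)
--         else:
--             PATTERNS_NGRAMS[key]= [pat]
--     return PATTERNS_NGRAMS
-- ===== SOURCE B (Python) =====
-- def ngram_sets(PATTERNS):
--     keys = dict.fromkeys(pat.count(' ') + 1 for pat in PATTERNS)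
--     return {k: [pat for pat in PATTERNS if pat.count(' ') + 1 == k] for k in keys}
-- ===== Notes on version B (the rewrite author's own statement) =====
-- stated objective: alternative
-- what changed: Replaces the single accumulating dict-building pass with a two-phase comprehension: first dedupe the word-count keys in first-seen order with dict.fromkeys, then build each group by filtering the full pattern list per key.
import Mathlib
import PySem

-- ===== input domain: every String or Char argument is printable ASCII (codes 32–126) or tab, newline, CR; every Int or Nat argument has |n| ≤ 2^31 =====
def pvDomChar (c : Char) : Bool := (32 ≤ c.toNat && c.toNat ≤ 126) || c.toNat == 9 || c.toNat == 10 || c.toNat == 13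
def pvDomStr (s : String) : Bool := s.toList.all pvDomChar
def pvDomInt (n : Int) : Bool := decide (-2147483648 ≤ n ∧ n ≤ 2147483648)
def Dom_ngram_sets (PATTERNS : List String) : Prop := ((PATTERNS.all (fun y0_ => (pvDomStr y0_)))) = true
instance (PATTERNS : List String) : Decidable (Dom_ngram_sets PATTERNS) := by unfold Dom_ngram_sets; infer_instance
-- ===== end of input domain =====

-- B groups patterns by a dedup-then-filter comprehension instead of A's single accumulating dict pass; alternative decomposition, same return value.

-- ===== PORT A =====

def ngram_sets (PATTERNS : List String) : List (Int × List String) :=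
  (PATTERNS.foldl (fun d pat =>
      let key : Int := (PySem.Str.count pat " " : Int) + 1
      if d.contains key then d.insert key (d.getD key [] ++ [pat])
      else d.insert key [pat])
    PySem.Dict.empty).items

-- ===== PORT B =====
def ngram_sets_alt (PATTERNS : List String) : List (Int × List String) :=
  (PySem.List.dedup (PATTERNS.map (fun pat => ((PySem.Str.count pat " " : Int) + 1)))).map
    (fun k => (k, PATTERNS.filter (fun pat => ((PySem.Str.count pat " " : Int) + 1) == k)))


-- ===== PRECONDITION & SPEC =====
def Spec_ngram_sets (PATTERNS : List String) (out : List (Int × List String)) : Prop := out = ngram_sets_alt PATTERNS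
instance (PATTERNS : List String) (out : List (Int × List String)) : Decidable (Spec_ngram_sets PATTERNS out) := by unfold Spec_ngram_sets; infer_instance

-- ===== CLAIM (what is proved, stated in full; the proofs are below) =====
def Claim_equal_ngram_sets : Prop := ∀ (PATTERNS : List String), Dom_ngram_sets PATTERNS → Spec_ngram_sets PATTERNS (ngram_sets PATTERNS)

-- ===== LEMMAS AND PROOFS =====

lemma step_eq (d : PySem.Dict Int (List String)) (k : Int) (x : String) :
    (if d.contains k then d.insert k (d.getD k [] ++ [x]) else d.insert k [x])
    = d.modify k [] (· ++ [x]) := by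
  simp only [PySem.Dict.modify]
  by_cases h : d.contains k = true
  · rw [if_pos h]
  · rw [if_neg h, PySem.Dict.getD_of_not_contains d _ (by simpa using h)]
    simp

lemma items_eq_map_keys (d : PySem.Dict Int (List String)) (h : d.keys.Nodup) :
    d.items = d.keys.map (fun k => (k, d.getD k [])) := by
  unfold PySem.Dict.keys
  rw [List.map_map]
  symm
  calc d.items.map ((fun k => (k, d.getD k [])) ∘ fun x => x.1)
      = d.items.map id := by
        apply List.map_congr_left
        intro p hp
        have := PySem.Dict.getD_of_mem_items d (k := p.1) (v := p.2) (by simpa using hp) h ([])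
        simp [this]
    _ = d.items := List.map_id _

lemma set_update_nil {α : Type} [BEq α] (xs : List α) :
    PySem.Set.update ([] : List α) xs = PySem.List.dedup xs := rfl

lemma ngram_sets_eq_alt (PATTERNS : List String) : ngram_sets PATTERNS = ngram_sets_alt PATTERNS := by
  unfold ngram_sets ngram_sets_alt
  have hstep : (PATTERNS.foldl (fun d pat =>
      let key : Int := (PySem.Str.count pat " " : Int) + 1
      if d.contains key then d.insert key (d.getD key [] ++ [pat])
      else d.insert key [pat]) PySem.Dict.empty)
    = PATTERNS.foldl (fun d pat => d.modify ((PySem.Str.count pat " " : Int) + 1) [] (· ++ [pat])) PySem.Dict.empty := by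
    congr 1
    funext d pat
    exact step_eq d _ pat
  rw [hstep]
  set D := PATTERNS.foldl (fun d pat => d.modify ((PySem.Str.count pat " " : Int) + 1) [] (· ++ [pat])) PySem.Dict.empty with hD
  have hnodup : D.keys.Nodup := by
    rw [hD]
    exact PySem.Dict.nodup_keys_foldl_modify_key PATTERNS (fun pat => ((PySem.Str.count pat " " : Int) + 1)) []
      (fun _ pat v => v ++ [pat]) PySem.Dict.empty (by simp)
  have hkeys : D.keys = PySem.List.dedup (PATTERNS.map (fun pat => ((PySem.Str.count pat " " : Int) + 1))) := by
    rw [hD]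
    rw [PySem.Dict.keys_foldl_modify_key PATTERNS (fun pat => ((PySem.Str.count pat " " : Int) + 1)) []
      (fun _ pat v => v ++ [pat]) PySem.Dict.empty]
    simp [PySem.Dict.keys_empty, set_update_nil]
  have hget : ∀ k : Int, D.getD k [] = PATTERNS.filter (fun pat => ((PySem.Str.count pat " " : Int) + 1) == k) := by
    intro k
    have h0 := PySem.Dict.getD_foldl_modify_append
      (PATTERNS.map (fun pat => (((PySem.Str.count pat " " : Int) + 1), pat)))
      (PySem.Dict.empty (κ := Int) (ν := List String)) k
    rw [List.foldl_map] at h0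
    simp only [List.filter_map, Function.comp_def] at h0
    rw [hD]
    simpa [Function.comp_def] using h0
  rw [items_eq_map_keys D hnodup, hkeys]
  apply List.map_congr_left
  intro k _
  rw [hget k]

-- ===== VERDICT (by name: the statement is the Claim_ definition above) =====
theorem ngram_sets_spec : Claim_equal_ngram_sets := by
  intro PATTERNS _
  unfold Spec_ngram_sets
  exact ngram_sets_eq_alt PATTERNS
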